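/-
  THE STEPS OF THE OWNERSHIP FOREST (design/INVARIANTS.md §2.1: "the only statements that change F"), proved ONCE, over the
  vocabulary of Gif/Spec/Common.lean. A machine proof walks the code and applies one of these per ownership move.

  The state invariant has two halves (`GifOK H F R mem = Owns H F.owned ∧ Shape F R mem`), and a step moves ONE of them:

  §1  THE LIST OF OWNED OBJECTS of a changed forest, as a permutation (for `Owns.perm`, `Owns.release`, `Owns.push_cons`)
      Forest.owned_scm / _icm / _saved / _pend
                              `F.owned ~ objs(component) ++ F.ownedBut…`, and `ownedBut…` does not depend on that component:
                              replacing ONE component replaces its objects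
      Saved.objs_snoc, Exts.objs_snoc
                              the last image / the last block, in front
      Forest.movedPend, Forest.owned_move_pend
                              the forest after DGifSlurp's move of the pending list into the last image; it owns the same objects
  §2  ONE COMPONENT'S SHAPE IN A NEW MEMORY (the obligations of §3, made from the old shape)
      MapAt.intro             a new colour map, from its two field values
      ExtsAt.empty / .first / .snoc / .moved / .set_last
                              the empty array; the first block; one more counted block; the array copied by `realloc`; the last block's fields stored
      SavedAt.first / .snoc / .moved / .drop_last / .set_last
                              the same for the SavedImages array
      rd_of_bytes             a field read in a COPY: equal bytes give equal values (what `realloc`'s post and `memcpy`'s post deliver)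
  §3  A STORE TO A POINTER / COUNT FIELD OF gif, OR TO THE CURSOR: the memory changed in loose windows and in the windows of ONE
      component; every OTHER component of the shape is kept, the changed one is the caller's obligation
      Shape.set_scm, .set_icm, .set_saved, .set_pend, .set_saved_pend, .set_cursor
      all six from ONE general step (`Shape.carry_set`), over
      Loose.off_structs       a loose window misses every structural window of the forest (for a footprint that has one loose
                              window beside the windows of the changed component: the pushed return addresses of the checks)
      carry_Geo H F R         where the windows of the shape are (inside objects of the heap with different bases, 64 bytes apart)
      carry_Off F R k… w      what a window of the footprint misses, component by component (a flag per component);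
                              `.of_loose`, `.in_gif`, `.in_saved_arr`, `.in_pend_arr`, `.in_cursor`: the kinds of windows
  §4  THE STATE INVARIANT THROUGH A CALL OF THE HEAP (the footprints of ProgX/Spec/Heap.lean, as `Returned.same` delivers them)
      GifOK.through_alloc     `malloc` / `calloc` / a `realloc` of NULL: the forest is untouched, the heap has one more object
      Shape.through_free      `free(p)`: the shape is untouched (a pointer to `p` dangles until the caller stores NULL)
-/
import Gif.Spec.Common
namespace Gif.Spec
open X86 X86.User Asan ProgX.Base ProgX.Base.Spec

/-! ### 1. The list of owned objects of a changed forest -/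

/-- The owned objects but those of `scm`. -/
def Forest.ownedButScm (F : Forest) : List (Nat × Nat) :=
  (F.gif, 120) :: (F.pv, 24936) :: (Map.objs F.icm ++ Saved.objs F.saved ++ Exts.objs F.pend)

/-- The owned objects but those of `icm`. -/
def Forest.ownedButIcm (F : Forest) : List (Nat × Nat) :=
  (F.gif, 120) :: (F.pv, 24936) :: (Map.objs F.scm ++ Saved.objs F.saved ++ Exts.objs F.pend)

/-- The owned objects but those of `saved`. -/
def Forest.ownedButSaved (F : Forest) : List (Nat × Nat) :=
  (F.gif, 120) :: (F.pv, 24936) :: (Map.objs F.scm ++ Map.objs F.icm ++ Exts.objs F.pend)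

/-- The owned objects but those of `pend`. -/
def Forest.ownedButPend (F : Forest) : List (Nat × Nat) :=
  (F.gif, 120) :: (F.pv, 24936) :: (Map.objs F.scm ++ Map.objs F.icm ++ Saved.objs F.saved)

/-- Two heads in front of an append move behind its first part. -/
theorem carry_perm_front {α : Type} (a b : α) (X Y : List α) : (a :: b :: (X ++ Y)).Perm (X ++ a :: b :: Y) := by
  have h1 : (X ++ a :: b :: Y).Perm (a :: (X ++ b :: Y)) := List.perm_middle
  have h2 : (X ++ b :: Y).Perm (b :: (X ++ Y)) := List.perm_middle
  exact (h1.trans (h2.cons a)).symm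

theorem Forest.owned_scm (F : Forest) : F.owned.Perm (Map.objs F.scm ++ F.ownedButScm) := by
  unfold Forest.owned Forest.ownedButScm
  simp only [List.append_assoc]
  exact carry_perm_front _ _ _ _

theorem Forest.owned_icm (F : Forest) : F.owned.Perm (Map.objs F.icm ++ F.ownedButIcm) := by
  unfold Forest.owned Forest.ownedButIcm
  simp only [List.append_assoc]
  have h1 : (Map.objs F.scm ++ (Map.objs F.icm ++ (Saved.objs F.saved ++ Exts.objs F.pend))).Perm
      (Map.objs F.icm ++ (Map.objs F.scm ++ (Saved.objs F.saved ++ Exts.objs F.pend))) :=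
    List.perm_append_comm_assoc _ _ _
  exact ((h1.cons _).cons _).trans (carry_perm_front _ _ _ _)

theorem Forest.owned_saved (F : Forest) : F.owned.Perm (Saved.objs F.saved ++ F.ownedButSaved) := by
  unfold Forest.owned Forest.ownedButSaved
  simp only [List.append_assoc]
  have h1 : (Map.objs F.icm ++ (Saved.objs F.saved ++ Exts.objs F.pend)).Perm
      (Saved.objs F.saved ++ (Map.objs F.icm ++ Exts.objs F.pend)) :=
    List.perm_append_comm_assoc _ _ _
  have h2 : (Map.objs F.scm ++ (Saved.objs F.saved ++ (Map.objs F.icm ++ Exts.objs F.pend))).Perm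
      (Saved.objs F.saved ++ (Map.objs F.scm ++ (Map.objs F.icm ++ Exts.objs F.pend))) :=
    List.perm_append_comm_assoc _ _ _
  have h3 := (h1.append_left (Map.objs F.scm)).trans h2
  exact ((h3.cons _).cons _).trans (carry_perm_front _ _ _ _)

theorem Forest.owned_pend (F : Forest) : F.owned.Perm (Exts.objs F.pend ++ F.ownedButPend) := by
  unfold Forest.owned Forest.ownedButPend
  have h1 : (Map.objs F.scm ++ Map.objs F.icm ++ Saved.objs F.saved ++ Exts.objs F.pend).Perm
      (Exts.objs F.pend ++ (Map.objs F.scm ++ Map.objs F.icm ++ Saved.objs F.saved)) :=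
    List.perm_append_comm
  exact ((h1.cons _).cons _).trans (carry_perm_front _ _ _ _)

/-- Replacing a component does not change the other components' objects. -/
theorem Forest.ownedButScm_set (F : Forest) (m : Option Map) : ({ F with scm := m } : Forest).ownedButScm = F.ownedButScm := rfl
theorem Forest.ownedButIcm_set (F : Forest) (m : Option Map) : ({ F with icm := m } : Forest).ownedButIcm = F.ownedButIcm := rfl
theorem Forest.ownedButSaved_set (F : Forest) (s : Option Saved) : ({ F with saved := s } : Forest).ownedButSaved = F.ownedButSaved :=
  rfl
theorem Forest.ownedButPend_set (F : Forest) (e : Option Exts) : ({ F with pend := e } : Forest).ownedButPend = F.ownedButPend := rfl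

/-- **THE FOREST AFTER THE MOVE** (DGifSlurp l.1266-1272): the last counted image `g` of the array `s` (`s.imgs = init ++ [g]`) has
the pending list, nothing is pending. With `F.pend = none` it is the forest whose last image has no list: the step needs no case
split on `F.pend`. Used by `Forest.owned_move_pend` (the ownership list) and by `Shape.move_pend` / `GifOK.move_pend`
(Gif/Spec/SlurpCarry.lean: the shape and the whole exit of DGifSlurp's segment 9). -/
def Forest.movedPend (F : Forest) (s : Saved) (init : List Img) (g : Img) : Forest :=
  { F with saved := some { s with imgs := init ++ [{ g with ext := F.pend }] }, pend := none }

/-- **MOVING THE PENDING LIST TO THE LAST IMAGE** (DGifSlurp l.1266-1272) moves no object: the forest with `pend := none` and the last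
image's `ext := F.pend` owns the same objects (the step of the ownership half: `Owns.perm` with its `.symm`). -/
theorem Forest.owned_move_pend (F : Forest) (s : Saved) (init : List Img) (g : Img) (hs : F.saved = some s)
    (hi : s.imgs = init ++ [g]) (hg : g.ext = none) : (F.movedPend s init g).owned.Perm F.owned := by
  unfold Forest.movedPend Forest.owned
  rw [hs]
  unfold Saved.objs
  simp only
  rw [hi]
  unfold Img.objs
  simp only [hg, Exts.objs, List.flatMap_append, List.flatMap_cons, List.flatMap_nil, List.append_nil, List.append_assoc,
    List.cons_append]
  exact List.Perm.refl _

/-- The objects of the array with one more counted image: the image's objects, in front. -/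
theorem Saved.objs_snoc (arr cap : Nat) (init : List Img) (g : Img) :
    (Saved.objs (some ⟨arr, cap, init ++ [g]⟩)).Perm (Img.objs g ++ Saved.objs (some ⟨arr, cap, init⟩)) := by
  unfold Saved.objs
  simp only [List.flatMap_append, List.flatMap_cons, List.flatMap_nil, List.append_nil]
  have h1 : (init.flatMap Img.objs ++ Img.objs g).Perm (Img.objs g ++ init.flatMap Img.objs) := List.perm_append_comm
  have h2 : (Img.objs g ++ (arr, 56 * cap) :: init.flatMap Img.objs).Perm
      ((arr, 56 * cap) :: (Img.objs g ++ init.flatMap Img.objs)) := List.perm_middle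
  exact (h1.cons _).trans h2.symm

/-- The objects of the list with one more counted block: the block's object, in front. -/
theorem Exts.objs_snoc (arr cap : Nat) (init : List Blk) (b : Blk) :
    (Exts.objs (some ⟨arr, cap, init ++ [b]⟩)).Perm (Blk.objs b ++ Exts.objs (some ⟨arr, cap, init⟩)) := by
  unfold Exts.objs
  simp only [List.flatMap_append, List.flatMap_cons, List.flatMap_nil, List.append_nil]
  have h1 : (init.flatMap Blk.objs ++ Blk.objs b).Perm (Blk.objs b ++ init.flatMap Blk.objs) := List.perm_append_comm
  have h2 : (Blk.objs b ++ (arr, 24 * cap) :: init.flatMap Blk.objs).Perm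
      ((arr, 24 * cap) :: (Blk.objs b ++ init.flatMap Blk.objs)) := List.perm_middle
  exact (h1.cons _).trans h2.symm

/-- The array object is the head of the array's objects (for `Owns.resize_head`, `Owns.release_head`): definitional. -/
theorem Saved.objs_some (s : Saved) : Saved.objs (some s) = (s.arr, 56 * s.cap) :: s.imgs.flatMap Img.objs := rfl
theorem Exts.objs_some (e : Exts) : Exts.objs (some e) = (e.arr, 24 * e.cap) :: e.blocks.flatMap Blk.objs := rfl

/-! ### 2. One component's shape in a new memory -/

/-- Reads at two addresses that agree byte by byte agree as numbers (`Mem.readLE_congr` with two bases). -/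
theorem carry_readLE_bytes (f g : Mem) (a b : Word) (n : Nat)
    (h : ∀ i, i < n → g.read (a + UInt64.ofNat i) = f.read (b + UInt64.ofNat i)) : g.readLE a n = f.readLE b n := by
  induction n generalizing a b with
  | zero => rfl
  | succ n ih =>
    simp only [Mem.readLE]
    have h0 := h 0 (Nat.succ_pos n)
    simp only [UInt64.reduceOfNat, UInt64.add_zero] at h0
    have hrest : ∀ i, i < n → g.read (a + 1 + UInt64.ofNat i) = f.read (b + 1 + UInt64.ofNat i) := by
      intro i hi
      rw [Mem.add_ofNat_succ, Mem.add_ofNat_succ]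
      exact h (i + 1) (Nat.succ_lt_succ hi)
    rw [h0, ih _ _ hrest]

/-- **A field read in a copy**: equal bytes give equal values. -/
theorem rd_of_bytes (mem mem' : Mem) (a b n : Nat) (ha : a + n < 2 ^ 64) (hb : b + n < 2 ^ 64)
    (h : ∀ i, i < n → rd mem' (a + i) 1 = rd mem (b + i) 1) : rd mem' a n = rd mem b n := by
  unfold rd
  apply carry_readLE_bytes
  intro i hi
  have hi' := h i hi
  unfold rd at hi'
  rw [Mem.readLE_one, Mem.readLE_one, UInt64.ofNat_add, UInt64.ofNat_add] at hi'
  exact UInt8.toNat_inj.mp hi'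

/-- A new colour map, from the values of its two fields. -/
theorem MapAt.intro {m : Map} {mem : Mem} (h1 : ColorMapObject.ColorCount mem m.obj = m.count)
    (h2 : ColorMapObject.Colors mem m.obj = m.colors) (h3 : 1 ≤ m.count) (h4 : m.count ≤ 256) : MapAt (some m) m.obj mem :=
  ⟨rfl, h1, h2, h3, h4⟩

/-- One block's fields through a memory that agrees on its 24 bytes. -/
theorem BlkAt.frame {a : Nat} {b : Blk} {mem mem' : Mem} (h : BlkAt a b mem) (he : Mem.EqOn a (a + 24) mem mem')
    (ha : a + 24 < 2 ^ 64) : BlkAt a b mem' := by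
  obtain ⟨j1, j2, j3, j4⟩ := h
  refine ⟨?_, ?_, j3, j4⟩
  · simp only [gfield] at j1 ⊢
    rw [he.rd a 4 (by omega) (by omega) (by omega)]
    exact j1
  · simp only [gfield] at j2 ⊢
    rw [he.rd (a + 8) 8 (by omega) (by omega) (by omega)]
    exact j2

/-- **The empty array** (GifAddExtensionBlock l.235: the array of `cap` slots `malloc` has just returned, before the first block is
counted): no block is counted, so no byte of the array is read. The shape obligation of `Shape.set_pend` at the store of
`gif.ExtensionBlocks` while `gif.ExtensionBlockCount` is still 0 (`GifOK.pend_first`, AllocCarry.lean). -/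
theorem ExtsAt.empty (arr cap : Nat) (mem : Mem) : ExtsAt (some ⟨arr, cap, []⟩) arr 0 mem := by
  refine ⟨rfl, rfl, Nat.zero_le _, ?_⟩
  intro i hi
  exact absurd hi (Nat.not_lt_zero i)

/-- **The first block of a list** (GifAddExtensionBlock on the empty list): the new array of `cap ≥ 1` slots at `arr`, one counted
block whose fields are in memory. -/
theorem ExtsAt.first {arr cap : Nat} {b : Blk} {mem : Mem} (hc : 1 ≤ cap) (hb : BlkAt arr b mem) :
    ExtsAt (some ⟨arr, cap, [b]⟩) arr 1 mem := by
  refine ⟨rfl, rfl, hc, ?_⟩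
  intro i hi
  simp only [List.length_singleton] at hi
  have e : i = 0 := by omega
  subst e
  exact hb

/-- **One more counted block**: the counted blocks are kept, the block behind them has its fields in memory, the capacity has room. -/
theorem ExtsAt.snoc {e : Exts} {p c : Nat} {b : Blk} {mem mem' : Mem} (h : ExtsAt (some e) p c mem)
    (hk : Mem.EqOn e.arr (e.arr + 24 * e.blocks.length) mem mem') (hlt : e.arr + 24 * (e.blocks.length + 1) < 2 ^ 64)
    (hcap : e.blocks.length + 1 ≤ e.cap) (hb : BlkAt (e.arr + 24 * e.blocks.length) b mem') :
    ExtsAt (some { e with blocks := e.blocks ++ [b] }) p (c + 1) mem' := by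
  obtain ⟨k1, k2, k3, k4⟩ := h
  refine ⟨k1, ?_, ?_, ?_⟩
  · simp only [List.length_append, List.length_singleton]
    omega
  · simp only [List.length_append, List.length_singleton]
    exact hcap
  · intro i hi
    simp only [List.length_append, List.length_singleton] at hi
    by_cases hlt : i < e.blocks.length
    · simp only [List.getElem_append_left hlt]
      apply (k4 i hlt).frame (hk.mono (by omega) (by omega))
      omega
    · have e1 : i = e.blocks.length := by omega
      subst e1
      simp only [List.getElem_append_right (Nat.le_refl _), Nat.sub_self, List.getElem_cons_zero]
      exact hb

/-- **The array copied to `q` by a moving `realloc`** (or kept in place: `q = e.arr`), with a new capacity: the counted blocks'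
bytes are the old ones. -/
theorem ExtsAt.moved {e : Exts} {p c : Nat} {mem mem' : Mem} (h : ExtsAt (some e) p c mem) (q cap' : Nat)
    (hcopy : ∀ i, i < 24 * e.blocks.length → rd mem' (q + i) 1 = rd mem (e.arr + i) 1)
    (hcap : e.blocks.length ≤ cap') (h1 : e.arr + 24 * e.blocks.length < 2 ^ 64) (h2 : q + 24 * e.blocks.length < 2 ^ 64) :
    ExtsAt (some { e with arr := q, cap := cap' }) q c mem' := by
  obtain ⟨k1, k2, k3, k4⟩ := h
  refine ⟨rfl, k2, hcap, ?_⟩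
  intro i hi
  obtain ⟨j1, j2, j3, j4⟩ := k4 i hi
  have hi' : i < e.blocks.length := hi
  refine ⟨?_, ?_, j3, j4⟩
  · simp only [gfield] at j1 ⊢
    rw [rd_of_bytes mem mem' (q + 24 * i) (e.arr + 24 * i) 4 (by omega) (by omega)]
    · exact j1
    · intro j hj
      rw [Nat.add_assoc, Nat.add_assoc]
      exact hcopy (24 * i + j) (by omega)
  · simp only [gfield] at j2 ⊢
    rw [rd_of_bytes mem mem' (q + 24 * i + 8) (e.arr + 24 * i + 8) 8 (by omega) (by omega)]
    · exact j2
    · intro j hj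
      rw [Nat.add_assoc, Nat.add_assoc, Nat.add_assoc, Nat.add_assoc]
      exact hcopy (24 * i + (8 + j)) (by omega)

/- One counted image's slot and structural parts through a memory that agrees on them: `ImgAt.frame` (Common.lean). -/

/-- **The first array** (DGifGetImageDesc l.455): no image is counted yet. -/
theorem SavedAt.first (arr cap : Nat) (mem : Mem) (hc : 1 ≤ cap) : SavedAt (some ⟨arr, cap, []⟩) arr 0 mem := by
  refine ⟨rfl, rfl, Nat.zero_le _, hc, ?_⟩
  intro k hk
  exact absurd hk (Nat.not_lt_zero k)

/-- **One more counted image** (DGifGetImageDesc l.476 `ImageCount++`): the counted slots and the images' structural parts are kept,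
the slot behind them agrees with `g`, the capacity has room. -/
theorem SavedAt.snoc {s : Saved} {p c : Nat} {g : Img} {mem mem' : Mem} (h : SavedAt (some s) p c mem)
    (hk : ∀ o, o ∈ Saved.structs (some s) → Mem.EqOn o.1 (o.1 + o.2) mem mem')
    (hlt : ∀ o, o ∈ Saved.structs (some s) → o.1 + o.2 < 2 ^ 64) (hcap : s.imgs.length + 1 ≤ s.cap)
    (hg : ImgAt (s.arr + 56 * s.imgs.length) g mem') :
    SavedAt (some { s with imgs := s.imgs ++ [g] }) p (c + 1) mem' := by
  obtain ⟨k1, k2, k3, k4, k5⟩ := h.frame hk hlt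
  refine ⟨k1, ?_, ?_, k4, ?_⟩
  · simp only [List.length_append, List.length_singleton]
    omega
  · simp only [List.length_append, List.length_singleton]
    exact hcap
  · intro k hk'
    simp only [List.length_append, List.length_singleton] at hk'
    by_cases hlt' : k < s.imgs.length
    · simp only [List.getElem_append_left hlt']
      exact k5 k hlt'
    · have e1 : k = s.imgs.length := by omega
      subst e1
      simp only [List.getElem_append_right (Nat.le_refl _), Nat.sub_self, List.getElem_cons_zero]
      exact hg

/-- One counted SavedImage whose 56 bytes were copied from `slot` to `slot'`, its structural parts kept. -/
theorem carry_ImgAt_moved {slot slot' : Nat} {g : Img} {mem mem' : Mem} (h : ImgAt slot g mem)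
    (hcopy : ∀ i, i < 56 → rd mem' (slot' + i) 1 = rd mem (slot + i) 1)
    (hk : ∀ o, o ∈ Img.structs g → Mem.EqOn o.1 (o.1 + o.2) mem mem')
    (hlt : slot + 56 < 2 ^ 64) (hlt' : slot' + 56 < 2 ^ 64) (hlt1 : ∀ x, g.cm = some x → x.obj + 24 < 2 ^ 64)
    (hlt2 : ∀ x, g.ext = some x → x.arr + 24 * x.blocks.length < 2 ^ 64) : ImgAt slot' g mem' := by
  obtain ⟨k1, k2, k3⟩ := h
  have hfield : ∀ off n, off + n ≤ 56 → rd mem' (slot' + off) n = rd mem (slot + off) n := by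
    intro off n hn
    apply rd_of_bytes mem mem' (slot' + off) (slot + off) n (by omega) (by omega)
    intro j hj
    rw [Nat.add_assoc, Nat.add_assoc]
    exact hcopy (off + j) (by omega)
  have e1 : SavedImage.ImageDesc.ColorMap mem' slot' = SavedImage.ImageDesc.ColorMap mem slot := by
    simp only [gfield]
    exact hfield 24 8 (by omega)
  have e2 : SavedImage.RasterBits mem' slot' = SavedImage.RasterBits mem slot := by
    simp only [gfield]
    exact hfield 32 8 (by omega)
  have e3 : SavedImage.ExtensionBlockCount mem' slot' = SavedImage.ExtensionBlockCount mem slot := by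
    simp only [gfield]
    exact hfield 40 4 (by omega)
  have e4 : SavedImage.ExtensionBlocks mem' slot' = SavedImage.ExtensionBlocks mem slot := by
    simp only [gfield]
    exact hfield 48 8 (by omega)
  have e5 : SavedImage.ImageDesc.Width mem' slot' = SavedImage.ImageDesc.Width mem slot := by
    simp only [gfield]
    exact hfield 8 4 (by omega)
  have e6 : SavedImage.ImageDesc.Height mem' slot' = SavedImage.ImageDesc.Height mem slot := by
    simp only [gfield]
    exact hfield 12 4 (by omega)
  refine ⟨?_, ?_, ?_⟩
  · rw [e1]
    apply k1.frame _ hlt1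
    intro o ho
    exact hk o (List.mem_append_left _ ho)
  · unfold RasterAt at k2 ⊢
    cases hr : g.raster with
    | none =>
      rw [hr] at k2
      simp only at k2 ⊢
      rw [e2]
      exact k2
    | some r =>
      rw [hr] at k2
      simp only at k2 ⊢
      rw [e2, e5, e6]
      exact k2
  · rw [e3, e4]
    apply k3.frame _ hlt2
    intro o ho
    exact hk o (List.mem_append_right _ ho)

/-- **The array copied to `q` by a moving `realloc`** (or kept in place), with a new capacity: the counted slots' bytes are the old
ones, the images' structural parts (their colour-map objects, their extension arrays: OTHER objects) are kept. -/
theorem SavedAt.moved {s : Saved} {p c : Nat} {mem mem' : Mem} (h : SavedAt (some s) p c mem) (q cap' : Nat)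
    (hcopy : ∀ i, i < 56 * s.imgs.length → rd mem' (q + i) 1 = rd mem (s.arr + i) 1)
    (hk : ∀ o, o ∈ s.imgs.flatMap Img.structs → Mem.EqOn o.1 (o.1 + o.2) mem mem')
    (hlt : ∀ o, o ∈ s.imgs.flatMap Img.structs → o.1 + o.2 < 2 ^ 64)
    (hcap : s.imgs.length ≤ cap') (hc1 : 1 ≤ cap') (h1 : s.arr + 56 * s.imgs.length < 2 ^ 64)
    (h2 : q + 56 * s.imgs.length < 2 ^ 64) : SavedAt (some { s with arr := q, cap := cap' }) q c mem' := by
  obtain ⟨k1, k2, k3, k4, k5⟩ := h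
  refine ⟨rfl, k2, hcap, hc1, ?_⟩
  intro k hk'
  have hk'' : k < s.imgs.length := hk'
  have hsub : ∀ o, o ∈ Img.structs s.imgs[k] → o ∈ s.imgs.flatMap Img.structs := by
    intro o ho
    simp only [List.mem_flatMap]
    exact ⟨s.imgs[k], List.getElem_mem hk'', ho⟩
  apply carry_ImgAt_moved (k5 k hk'')
  · intro i hi
    rw [Nat.add_assoc, Nat.add_assoc]
    exact hcopy (56 * k + i) (by omega)
  · intro o ho
    exact hk o (hsub o ho)
  · omega
  · show q + 56 * k + 56 < 2 ^ 64
    omega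
  · intro m hm
    have := hlt (m.obj, 24) (hsub _ (by
      unfold Img.structs
      rw [hm]
      simp only [Map.structs, List.mem_append, List.mem_singleton, true_or]))
    exact this
  · intro e he'
    have := hlt (e.arr, 24 * e.blocks.length) (hsub _ (by
      unfold Img.structs
      rw [he']
      simp only [Exts.structs, List.mem_append, List.mem_singleton, or_true]))
    exact this

/-- **The last image is dropped** (DGifDecreaseImageCounter l.1157 `ImageCount--`): the other slots are as they were. -/
theorem SavedAt.drop_last {s : Saved} {p c : Nat} {init : List Img} {g : Img} {mem : Mem} (h : SavedAt (some s) p c mem)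
    (hi : s.imgs = init ++ [g]) : SavedAt (some { s with imgs := init }) p (c - 1) mem := by
  obtain ⟨arr, cap, imgs⟩ := s
  simp only at hi
  subst hi
  obtain ⟨k1, k2, k3, k4, k5⟩ := h
  simp only [List.length_append, List.length_singleton] at k2 k3
  refine ⟨k1, ?_, ?_, k4, ?_⟩
  · show c - 1 = init.length
    omega
  · show init.length ≤ cap
    omega
  · intro k hk
    have hk' : k < init.length := hk
    have hk'' : k < (init ++ [g]).length := by
      simp only [List.length_append, List.length_singleton]
      omega
    have := k5 k hk''
    simp only [List.getElem_append_left hk'] at this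
    exact this

/-- **The last image's slot was stored to** (its raster: DGifSlurp l.1222; its extension list: l.1267-1268): the other slots and
every image's structural parts are kept, the last slot agrees with `g'`. -/
theorem SavedAt.set_last {s : Saved} {p c : Nat} {init : List Img} {g g' : Img} {mem mem' : Mem} (h : SavedAt (some s) p c mem)
    (hi : s.imgs = init ++ [g])
    (hslots : Mem.EqOn s.arr (s.arr + 56 * init.length) mem mem')
    (hk : ∀ o, o ∈ init.flatMap Img.structs → Mem.EqOn o.1 (o.1 + o.2) mem mem')
    (hlt : ∀ o, o ∈ Saved.structs (some s) → o.1 + o.2 < 2 ^ 64)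
    (hg : ImgAt (s.arr + 56 * init.length) g' mem') :
    SavedAt (some { s with imgs := init ++ [g'] }) p c mem' := by
  have hlen : s.imgs.length = init.length + 1 := by
    rw [hi]
    simp only [List.length_append, List.length_singleton]
  have hc : c = init.length + 1 := by
    rw [← hlen]
    exact h.2.1
  have hcap : init.length + 1 ≤ s.cap := by
    rw [← hlen]
    exact h.2.2.1
  have hsub : ∀ o, o ∈ Saved.structs (some { s with imgs := init }) → (o = (s.arr, 56 * init.length) ∨ o ∈ init.flatMap Img.structs) := by
    intro o ho
    simp only [Saved.structs, List.mem_cons] at ho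
    exact ho
  have hsub' : ∀ o, o ∈ init.flatMap Img.structs → o ∈ Saved.structs (some s) := by
    intro o ho
    simp only [Saved.structs, List.mem_cons, hi, List.flatMap_append, List.mem_append]
    exact Or.inr (Or.inl ho)
  have hin0 := hlt (s.arr, 56 * s.imgs.length) (by simp only [Saved.structs, List.mem_cons, true_or])
  simp only at hin0
  have h1 : SavedAt (some { s with imgs := init }) p (c - 1) mem' := by
    apply (h.drop_last hi).frame
    · intro o ho
      rcases hsub o ho with e | hin
      · rw [e]
        exact hslots
      · exact hk o hin
    · intro o ho
      rcases hsub o ho with e | hin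
      · rw [e]
        simp only
        omega
      · exact hlt o (hsub' o hin)
  have h2 := SavedAt.snoc (g := g') h1 (fun o _ => Mem.EqOn.refl _ _ _) (by
    intro o ho
    rcases hsub o ho with e | hin
    · rw [e]
      simp only
      omega
    · exact hlt o (hsub' o hin)) hcap hg
  have e2 : c - 1 + 1 = c := by omega
  rw [e2] at h2
  exact h2

/-! ### 3. A store to a pointer / count field of gif, or to the cursor

`X` below: the windows of the ONE component that changes. The memory changed only in loose windows and in windows inside `X`'s
spans; every OTHER component of the shape is kept; the changed component's new shape is the caller's obligation (§2). `hp`: where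
the objects of the OLD forest are (`Owns.placed`, `Placed.push` …). -/

/-! #### 3a. Where the windows of the shape are -/

/-- The bases of the structural parts of a colour map are among the bases of its objects, in the same order. -/
theorem carry_Map_structs_sub (m : Option Map) : ((Map.structs m).map Prod.fst).Sublist ((Map.objs m).map Prod.fst) := by
  cases m with
  | none => exact List.Sublist.refl _
  | some x =>
    simp only [Map.structs, Map.objs, List.map_cons, List.map_nil]
    exact (List.nil_sublist _).cons_cons _

/-- The same for an extension list. -/
theorem carry_Exts_structs_sub (e : Option Exts) : ((Exts.structs e).map Prod.fst).Sublist ((Exts.objs e).map Prod.fst) := by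
  cases e with
  | none => exact List.Sublist.refl _
  | some x =>
    simp only [Exts.structs, Exts.objs, List.map_cons, List.map_nil]
    exact (List.nil_sublist _).cons_cons _

/-- The same for one saved image. -/
theorem carry_Img_structs_sub (g : Img) : ((Img.structs g).map Prod.fst).Sublist ((Img.objs g).map Prod.fst) := by
  unfold Img.structs Img.objs
  simp only [List.map_append, List.append_assoc]
  apply List.Sublist.append (carry_Map_structs_sub g.cm)
  exact (carry_Exts_structs_sub g.ext).trans (List.sublist_append_right _ _)

/-- `flatMap` of pointwise sublists is a sublist. -/
theorem carry_flatMap_sub {α β : Type} (f f' : α → List β) (h : ∀ a, (f a).Sublist (f' a)) (l : List α) :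
    (l.flatMap f).Sublist (l.flatMap f') := by
  induction l with
  | nil => exact List.Sublist.refl _
  | cons a rest ih =>
    simp only [List.flatMap_cons]
    exact List.Sublist.append (h a) ih

/-- The same for the SavedImages array. -/
theorem carry_Saved_structs_sub (s : Option Saved) : ((Saved.structs s).map Prod.fst).Sublist ((Saved.objs s).map Prod.fst) := by
  cases s with
  | none => exact List.Sublist.refl _
  | some x =>
    simp only [Saved.structs, Saved.objs, List.map_cons, List.map_flatMap]
    apply List.Sublist.cons_cons
    exact carry_flatMap_sub _ _ (fun g => carry_Img_structs_sub g) x.imgs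

/-- The bases of the structural windows of the forest are among the bases of its owned objects besides gif and pv, in the same
order. -/
theorem carry_Forest_structs_sub (F : Forest) : (F.structs.map Prod.fst).Sublist
    ((Map.objs F.scm ++ Map.objs F.icm ++ Saved.objs F.saved ++ Exts.objs F.pend).map Prod.fst) := by
  unfold Forest.structs
  simp only [List.map_append]
  have h1 := (carry_Map_structs_sub F.scm).append (carry_Map_structs_sub F.icm)
  have h2 := h1.append (carry_Saved_structs_sub F.saved)
  exact h2.append (carry_Exts_structs_sub F.pend)

/-- **No two structural windows have the same base.** -/
theorem carry_structs_apart {H : Heap} {F : Forest} (hp : Placed H F.owned) : F.structs.Pairwise (fun a b => a.1 ≠ b.1) := by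
  have h1 := hp.apart
  unfold Forest.owned at h1
  have h2 := (List.pairwise_cons.mp (List.pairwise_cons.mp h1).2).2
  have h3 : ((Map.objs F.scm ++ Map.objs F.icm ++ Saved.objs F.saved ++ Exts.objs F.pend).map Prod.fst).Pairwise
      (fun a b => a ≠ b) := List.pairwise_map.mpr h2
  have h4 := h3.sublist (carry_Forest_structs_sub F)
  exact List.pairwise_map.mp h4

/-- In a list without a base twice, the base determines the entry. -/
theorem carry_base_inj {l : List (Nat × Nat)} (hl : l.Pairwise (fun x y => x.1 ≠ y.1)) {a b : Nat × Nat} (ha : a ∈ l) (hb : b ∈ l)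
    (e : a.1 = b.1) : a = b := by
  induction l with
  | nil => exact absurd ha List.not_mem_nil
  | cons x rest ih =>
    obtain ⟨hx, hrest⟩ := List.pairwise_cons.mp hl
    rcases List.mem_cons.mp ha with e1 | hr
    · rcases List.mem_cons.mp hb with e2 | hr'
      · exact e1.trans e2.symm
      · subst e1
        exact absurd e (hx b hr')
    · rcases List.mem_cons.mp hb with e2 | hr'
      · subst e2
        exact absurd e.symm (hx a hr)
      · exact ih hrest hr hr'

/-- The structural windows of each component are structural windows of the forest. -/
theorem carry_mem_structs_scm {F : Forest} {o : Nat × Nat} (ho : o ∈ Map.structs F.scm) : o ∈ F.structs := by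
  unfold Forest.structs
  exact List.mem_append_left _ (List.mem_append_left _ (List.mem_append_left _ ho))

theorem carry_mem_structs_icm {F : Forest} {o : Nat × Nat} (ho : o ∈ Map.structs F.icm) : o ∈ F.structs := by
  unfold Forest.structs
  exact List.mem_append_left _ (List.mem_append_left _ (List.mem_append_right _ ho))

theorem carry_mem_structs_saved {F : Forest} {o : Nat × Nat} (ho : o ∈ Saved.structs F.saved) : o ∈ F.structs := by
  unfold Forest.structs
  exact List.mem_append_left _ (List.mem_append_right _ ho)

theorem carry_mem_structs_pend {F : Forest} {o : Nat × Nat} (ho : o ∈ Exts.structs F.pend) : o ∈ F.structs := by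
  unfold Forest.structs
  exact List.mem_append_right _ ho

/-- **WHERE THE WINDOWS OF THE SHAPE ARE**, collected once from `Shape`, `Placed`, the heap's invariant and the cursor's range: gif,
pv and every structural window lie inside objects of the heap with different bases; objects with different bases are 64 bytes
apart; every object lies in the data space, off the cursor and above the constants. -/
structure carry_Geo (H : Heap) (F : Forest) (R : Rd) : Prop where
  gifObj : ∃ x, x ∈ H.objs ∧ x.base = F.gif ∧ 120 ≤ x.cap
  pvObj : ∃ x, x ∈ H.objs ∧ x.base = F.pv ∧ 24936 ≤ x.cap
  structObj : ∀ o, o ∈ F.structs → ∃ x, x ∈ H.objs ∧ x.base = o.1 ∧ o.2 ≤ x.cap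
  gif_ne_pv : F.gif ≠ F.pv
  struct_ne : ∀ o, o ∈ F.structs → o.1 ≠ F.gif ∧ o.1 ≠ F.pv
  apart : F.structs.Pairwise (fun a b => a.1 ≠ b.1)
  far : ∀ x y, x ∈ H.objs → y ∈ H.objs → x.base ≠ y.base → x.base + x.cap + 64 ≤ y.base ∨ y.base + y.cap + 64 ≤ x.base
  offCur : ∀ x, x ∈ H.objs → x.base + x.cap ≤ R.cur ∨ R.cur + 16 ≤ x.base
  inData : ∀ x, x ∈ H.objs → 0x200040 ≤ x.base ∧ x.base + x.cap + 32 ≤ 0xC00000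
  cur : 0x700000 ≤ R.cur ∧ R.cur + 16 ≤ 0x800000

/-- The geometry, from the hypotheses every step of §3 has. -/
theorem carry_Geo.intro {H : Heap} {F : Forest} {R : Rd} {mem : Mem} (h : Shape F R mem) (hp : Placed H F.owned)
    (hok : HeapOK H mem) (hcur : 0x700000 ≤ R.cur ∧ R.cur + 16 ≤ 0x800000) : carry_Geo H F R := by
  have hgin : (F.gif, 120) ∈ F.owned := List.mem_cons_self
  have hpin : (F.pv, 24936) ∈ F.owned := List.mem_cons_of_mem _ List.mem_cons_self
  refine ⟨hp.at_ _ hgin, hp.at_ _ hpin, ?_, ?_, hp.structs_ne.1, carry_structs_apart hp, ?_, ?_, ?_, hcur⟩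
  · intro o ho
    obtain ⟨n, hn, hle⟩ := h.structs_owned o ho
    obtain ⟨x, hx, k1, k2⟩ := hp.at_ _ hn
    simp only at k1 k2
    exact ⟨x, hx, k1, by omega⟩
  · have h1 := List.pairwise_cons.mp hp.apart
    exact h1.1 (F.pv, 24936) List.mem_cons_self
  · intro x y hx hy hne
    exact hok.apart_of_base_ne hx hy hne
  · intro x hx
    have h1 := hok.obj_range hx
    have h2 := hok.room
    have h3 := hok.offStack
    omega
  · intro x hx
    have h1 := hok.obj_inside hx
    omega

namespace carry_Geo
variable {H : Heap} {F : Forest} {R : Rd}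

/-- **A window inside (the capacity of) an object of the heap** misses gif and pv if the object is neither, every structural
window with another base, the cursor, the constants. -/
theorem in_obj (G : carry_Geo H F R) {x : HObj} (hx : x ∈ H.objs) {w : Span} (h1 : x.base ≤ w.lo) (h2 : w.hi ≤ x.base + x.cap) :
    (x.base ≠ F.gif → w.hi ≤ F.gif ∨ F.gif + 120 ≤ w.lo) ∧
    (x.base ≠ F.pv → w.hi ≤ F.pv ∨ F.pv + 24936 ≤ w.lo) ∧
    (∀ o, o ∈ F.structs → o.1 ≠ x.base → w.hi ≤ o.1 ∨ o.1 + o.2 ≤ w.lo) ∧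
    (w.hi ≤ R.cur ∨ R.cur + 16 ≤ w.lo) ∧
    (w.hi ≤ 0x141300 ∨ 0x14139a ≤ w.lo) := by
  have hin := G.inData x hx
  refine ⟨?_, ?_, ?_, ?_, ?_⟩
  · intro hne
    obtain ⟨y, hy, e, hc⟩ := G.gifObj
    have hf := G.far x y hx hy (by
      rw [e]
      exact hne)
    omega
  · intro hne
    obtain ⟨y, hy, e, hc⟩ := G.pvObj
    have hf := G.far x y hx hy (by
      rw [e]
      exact hne)
    omega
  · intro o ho hne
    obtain ⟨y, hy, e, hc⟩ := G.structObj o ho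
    have hf := G.far x y hx hy (by
      rw [e]
      exact Ne.symm hne)
    omega
  · have hc := G.offCur x hx
    omega
  · omega

/-- The base determines the structural window. -/
theorem struct_inj (G : carry_Geo H F R) {a b : Nat × Nat} (ha : a ∈ F.structs) (hb : b ∈ F.structs) (e : a.1 = b.1) : a = b :=
  carry_base_inj G.apart ha hb e

/-- **The structural windows of different components have different bases.** -/
theorem cross (G : carry_Geo H F R) :
    (∀ a, a ∈ Map.structs F.scm → ∀ b, b ∈ Saved.structs F.saved → a.1 ≠ b.1) ∧
    (∀ a, a ∈ Map.structs F.icm → ∀ b, b ∈ Saved.structs F.saved → a.1 ≠ b.1) ∧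
    (∀ a, a ∈ Map.structs F.scm → ∀ b, b ∈ Exts.structs F.pend → a.1 ≠ b.1) ∧
    (∀ a, a ∈ Map.structs F.icm → ∀ b, b ∈ Exts.structs F.pend → a.1 ≠ b.1) ∧
    (∀ a, a ∈ Saved.structs F.saved → ∀ b, b ∈ Exts.structs F.pend → a.1 ≠ b.1) := by
  have h0 := G.apart
  unfold Forest.structs at h0
  obtain ⟨h1, _, x3⟩ := List.pairwise_append.mp h0
  obtain ⟨_, _, x2⟩ := List.pairwise_append.mp h1
  refine ⟨?_, ?_, ?_, ?_, ?_⟩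
  · intro a ha b hb
    exact x2 a (List.mem_append_left _ ha) b hb
  · intro a ha b hb
    exact x2 a (List.mem_append_right _ ha) b hb
  · intro a ha b hb
    exact x3 a (List.mem_append_left _ (List.mem_append_left _ ha)) b hb
  · intro a ha b hb
    exact x3 a (List.mem_append_left _ (List.mem_append_right _ ha)) b hb
  · intro a ha b hb
    exact x3 a (List.mem_append_right _ ha) b hb

end carry_Geo

/-! #### 3b. What a window of a footprint misses -/

/-- **The window `w` misses what `Shape F R` reads**, component by component: the flag of a component (`kScm`: the system colour
map, `kIcm`: the image's colour map, `kSav`: the SavedImages array, `kPend`: the pending extension list, `kCur`: the cursor) says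
that the windows of THAT component are missed too; gif's `UserData` and `Private`, pv's `FileState`, `File`, `Read` and the
constants are always missed. -/
structure carry_Off (F : Forest) (R : Rd) (kScm kIcm kSav kPend kCur : Prop) (w : Span) : Prop where
  scmF : kScm → w.hi ≤ F.gif + 24 ∨ F.gif + 32 ≤ w.lo
  cntF : kSav → w.hi ≤ F.gif + 32 ∨ F.gif + 36 ≤ w.lo
  icmF : kIcm → w.hi ≤ F.gif + 64 ∨ F.gif + 72 ≤ w.lo
  savF : kSav → w.hi ≤ F.gif + 72 ∨ F.gif + 80 ≤ w.lo
  pcF : kPend → w.hi ≤ F.gif + 80 ∨ F.gif + 84 ≤ w.lo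
  pendF : kPend → w.hi ≤ F.gif + 88 ∨ F.gif + 96 ≤ w.lo
  gif3 : w.hi ≤ F.gif + 104 ∨ F.gif + 120 ≤ w.lo
  pv1 : w.hi ≤ F.pv ∨ F.pv + 4 ≤ w.lo
  pv2 : w.hi ≤ F.pv + 64 ∨ F.pv + 80 ≤ w.lo
  cursor : kCur → w.hi ≤ R.cur ∨ R.cur + 16 ≤ w.lo
  consts : w.hi ≤ 0x141300 ∨ 0x14139a ≤ w.lo
  scmS : kScm → ∀ o, o ∈ Map.structs F.scm → w.hi ≤ o.1 ∨ o.1 + o.2 ≤ w.lo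
  icmS : kIcm → ∀ o, o ∈ Map.structs F.icm → w.hi ≤ o.1 ∨ o.1 + o.2 ≤ w.lo
  savS : kSav → ∀ o, o ∈ Saved.structs F.saved → w.hi ≤ o.1 ∨ o.1 + o.2 ≤ w.lo
  pendS : kPend → ∀ o, o ∈ Exts.structs F.pend → w.hi ≤ o.1 ∨ o.1 + o.2 ≤ w.lo

namespace carry_Off
variable {H : Heap} {F : Forest} {R : Rd} {kScm kIcm kSav kPend kCur : Prop} {w : Span}

/-- A window that misses gif altogether: from what it misses besides. -/
theorem of_off_gif (hg : w.hi ≤ F.gif ∨ F.gif + 120 ≤ w.lo) (hp : w.hi ≤ F.pv ∨ F.pv + 24936 ≤ w.lo ∨ (F.pv + 4 ≤ w.lo ∧ w.hi ≤ F.pv + 64) ∨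
      (F.pv + 80 ≤ w.lo ∧ w.hi ≤ F.pv + 24936))
    (hc : kCur → w.hi ≤ R.cur ∨ R.cur + 16 ≤ w.lo) (hk : w.hi ≤ 0x141300 ∨ 0x14139a ≤ w.lo)
    (h1 : kScm → ∀ o, o ∈ Map.structs F.scm → w.hi ≤ o.1 ∨ o.1 + o.2 ≤ w.lo)
    (h2 : kIcm → ∀ o, o ∈ Map.structs F.icm → w.hi ≤ o.1 ∨ o.1 + o.2 ≤ w.lo)
    (h3 : kSav → ∀ o, o ∈ Saved.structs F.saved → w.hi ≤ o.1 ∨ o.1 + o.2 ≤ w.lo)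
    (h4 : kPend → ∀ o, o ∈ Exts.structs F.pend → w.hi ≤ o.1 ∨ o.1 + o.2 ≤ w.lo) :
    carry_Off F R kScm kIcm kSav kPend kCur w := by
  refine ⟨?_, ?_, ?_, ?_, ?_, ?_, ?_, ?_, ?_, hc, hk, h1, h2, h3, h4⟩
  · intro _
    omega
  · intro _
    omega
  · intro _
    omega
  · intro _
    omega
  · intro _
    omega
  · intro _
    omega
  · omega
  · omega
  · omega

/-- **A window inside an object of the heap that is neither gif nor pv**: it misses every structural window with another base;
for a structural window with THAT base the caller says why it is missed (the flag is off, or the window lies behind it). -/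
theorem in_obj (G : carry_Geo H F R) {x : HObj} (hx : x ∈ H.objs) (h1 : x.base ≤ w.lo) (h2 : w.hi ≤ x.base + x.cap)
    (hg : x.base ≠ F.gif) (hp : x.base ≠ F.pv)
    (c1 : kScm → ∀ o, o ∈ Map.structs F.scm → o.1 ≠ x.base ∨ w.hi ≤ o.1 ∨ o.1 + o.2 ≤ w.lo)
    (c2 : kIcm → ∀ o, o ∈ Map.structs F.icm → o.1 ≠ x.base ∨ w.hi ≤ o.1 ∨ o.1 + o.2 ≤ w.lo)
    (c3 : kSav → ∀ o, o ∈ Saved.structs F.saved → o.1 ≠ x.base ∨ w.hi ≤ o.1 ∨ o.1 + o.2 ≤ w.lo)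
    (c4 : kPend → ∀ o, o ∈ Exts.structs F.pend → o.1 ≠ x.base ∨ w.hi ≤ o.1 ∨ o.1 + o.2 ≤ w.lo) :
    carry_Off F R kScm kIcm kSav kPend kCur w := by
  obtain ⟨wg, wp, ws, wc, wk⟩ := G.in_obj hx h1 h2
  have hpv := wp hp
  apply of_off_gif (wg hg) (by omega) (fun _ => wc) wk
  · intro k o ho
    rcases c1 k o ho with hne | hoff
    · exact ws o (carry_mem_structs_scm ho) hne
    · exact hoff
  · intro k o ho
    rcases c2 k o ho with hne | hoff
    · exact ws o (carry_mem_structs_icm ho) hne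
    · exact hoff
  · intro k o ho
    rcases c3 k o ho with hne | hoff
    · exact ws o (carry_mem_structs_saved ho) hne
    · exact hoff
  · intro k o ho
    rcases c4 k o ho with hne | hoff
    · exact ws o (carry_mem_structs_pend ho) hne
    · exact hoff

/-- **A window inside `[gif + a, gif + b)`**, `b ≤ 104`: it misses the fields of gif the offsets say, and everything outside gif. -/
theorem in_gif (G : carry_Geo H F R) (a b : Nat) (h1 : F.gif + a ≤ w.lo) (h2 : w.hi ≤ F.gif + b) (hb : b ≤ 104)
    (c1 : kScm → b ≤ 24 ∨ 32 ≤ a) (c2 : kIcm → b ≤ 64 ∨ 72 ≤ a) (c3 : kSav → (b ≤ 32 ∨ 36 ≤ a) ∧ (b ≤ 72 ∨ 80 ≤ a))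
    (c4 : kPend → (b ≤ 80 ∨ 84 ≤ a) ∧ (b ≤ 88 ∨ 96 ≤ a)) : carry_Off F R kScm kIcm kSav kPend kCur w := by
  obtain ⟨x, hx, e, hc⟩ := G.gifObj
  obtain ⟨_, wp, ws, wc, wk⟩ := G.in_obj hx (w := w) (by omega) (by omega)
  have hpv := wp (by
    rw [e]
    exact G.gif_ne_pv)
  have hst : ∀ o, o ∈ F.structs → w.hi ≤ o.1 ∨ o.1 + o.2 ≤ w.lo := by
    intro o ho
    apply ws o ho
    rw [e]
    exact (G.struct_ne o ho).1
  refine ⟨?_, ?_, ?_, ?_, ?_, ?_, ?_, ?_, ?_, fun _ => wc, wk, ?_, ?_, ?_, ?_⟩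
  · intro k
    have := c1 k
    omega
  · intro k
    have := c3 k
    omega
  · intro k
    have := c2 k
    omega
  · intro k
    have := c3 k
    omega
  · intro k
    have := c4 k
    omega
  · intro k
    have := c4 k
    omega
  · omega
  · omega
  · omega
  · intro _ o ho
    exact hst o (carry_mem_structs_scm ho)
  · intro _ o ho
    exact hst o (carry_mem_structs_icm ho)
  · intro _ o ho
    exact hst o (carry_mem_structs_saved ho)
  · intro _ o ho
    exact hst o (carry_mem_structs_pend ho)

/-- **A window inside the body of pv** (`[pv + 4, pv + 64)` or `[pv + 80, pv + 24936)`). -/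
theorem in_pv (G : carry_Geo H F R) (h : (F.pv + 4 ≤ w.lo ∧ w.hi ≤ F.pv + 64) ∨ (F.pv + 80 ≤ w.lo ∧ w.hi ≤ F.pv + 24936)) :
    carry_Off F R kScm kIcm kSav kPend kCur w := by
  obtain ⟨x, hx, e, hc⟩ := G.pvObj
  obtain ⟨wg, _, ws, wc, wk⟩ := G.in_obj hx (w := w) (by omega) (by omega)
  have hgif := wg (by
    rw [e]
    exact Ne.symm G.gif_ne_pv)
  have hst : ∀ o, o ∈ F.structs → w.hi ≤ o.1 ∨ o.1 + o.2 ≤ w.lo := by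
    intro o ho
    apply ws o ho
    rw [e]
    exact (G.struct_ne o ho).2
  apply of_off_gif hgif (by omega) (fun _ => wc) wk
  · intro _ o ho
    exact hst o (carry_mem_structs_scm ho)
  · intro _ o ho
    exact hst o (carry_mem_structs_icm ho)
  · intro _ o ho
    exact hst o (carry_mem_structs_saved ho)
  · intro _ o ho
    exact hst o (carry_mem_structs_pend ho)

/-- **A window that meets no object of the heap**, nor the cursor, nor the constants. -/
theorem gap (G : carry_Geo H F R) (h : Gap H R w) : carry_Off F R kScm kIcm kSav kPend kCur w := by
  obtain ⟨hobj, hc, hk⟩ := h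
  obtain ⟨xg, hxg, eg, cg⟩ := G.gifObj
  obtain ⟨xp, hxp, ep, cp⟩ := G.pvObj
  have h1 := hobj xg hxg
  have h2 := hobj xp hxp
  have hst : ∀ o, o ∈ F.structs → w.hi ≤ o.1 ∨ o.1 + o.2 ≤ w.lo := by
    intro o ho
    obtain ⟨y, hy, e, hcap⟩ := G.structObj o ho
    have h3 := hobj y hy
    omega
  apply of_off_gif (by omega) (by omega) (fun _ => hc) hk
  · intro _ o ho
    exact hst o (carry_mem_structs_scm ho)
  · intro _ o ho
    exact hst o (carry_mem_structs_icm ho)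
  · intro _ o ho
    exact hst o (carry_mem_structs_saved ho)
  · intro _ o ho
    exact hst o (carry_mem_structs_pend ho)

/-- **A window inside the cursor**: it misses everything but the cursor. -/
theorem in_cursor (G : carry_Geo H F R) (h1 : R.cur ≤ w.lo) (h2 : w.hi ≤ R.cur + 16) (hk : kCur → False) :
    carry_Off F R kScm kIcm kSav kPend kCur w := by
  obtain ⟨xg, hxg, eg, cg⟩ := G.gifObj
  obtain ⟨xp, hxp, ep, cp⟩ := G.pvObj
  have g1 := G.offCur xg hxg
  have g2 := G.inData xg hxg
  have p1 := G.offCur xp hxp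
  have p2 := G.inData xp hxp
  have hcur := G.cur
  have hst : ∀ o, o ∈ F.structs → w.hi ≤ o.1 ∨ o.1 + o.2 ≤ w.lo := by
    intro o ho
    obtain ⟨y, hy, e, hcap⟩ := G.structObj o ho
    have h3 := G.offCur y hy
    omega
  apply of_off_gif (by omega) (by omega) (fun k => absurd k hk) (by omega)
  · intro _ o ho
    exact hst o (carry_mem_structs_scm ho)
  · intro _ o ho
    exact hst o (carry_mem_structs_icm ho)
  · intro _ o ho
    exact hst o (carry_mem_structs_saved ho)
  · intro _ o ho
    exact hst o (carry_mem_structs_pend ho)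

/-- **A LOOSE WINDOW MISSES EVERYTHING THE SHAPE READS.** -/
theorem of_loose (G : carry_Geo H F R) (h : Loose H F R w) : carry_Off F R kScm kIcm kSav kPend kCur w := by
  rcases h with hgap | hg1 | hg2 | hg3 | hp1 | hp2 | hdata | htail
  · exact gap G hgap
  · exact in_gif G 0 24 (by omega) hg1.2 (by omega) (fun _ => by omega) (fun _ => by omega) (fun _ => by omega) (fun _ => by omega)
  · exact in_gif G 40 64 hg2.1 hg2.2 (by omega) (fun _ => by omega) (fun _ => by omega) (fun _ => by omega) (fun _ => by omega)
  · exact in_gif G 96 104 hg3.1 hg3.2 (by omega) (fun _ => by omega) (fun _ => by omega) (fun _ => by omega) (fun _ => by omega)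
  · exact in_pv G (Or.inl hp1)
  · exact in_pv G (Or.inr hp2)
  · obtain ⟨x, hx, h1, h2, hng, hnp, hns⟩ := hdata
    apply in_obj G hx h1 h2 hng hnp
    · intro _ o ho
      exact Or.inl (hns o (carry_mem_structs_scm ho))
    · intro _ o ho
      exact Or.inl (hns o (carry_mem_structs_icm ho))
    · intro _ o ho
      exact Or.inl (hns o (carry_mem_structs_saved ho))
    · intro _ o ho
      exact Or.inl (hns o (carry_mem_structs_pend ho))
  · obtain ⟨o, x, ho, hx, hb, h1, h2⟩ := htail
    have hne := G.struct_ne o ho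
    have hall : ∀ o', o' ∈ F.structs → o'.1 ≠ x.base ∨ w.hi ≤ o'.1 ∨ o'.1 + o'.2 ≤ w.lo := by
      intro o' ho'
      by_cases e : o'.1 = x.base
      · have e' : o' = o := G.struct_inj ho' ho (e.trans hb)
        rw [e']
        exact Or.inr (Or.inr h1)
      · exact Or.inl e
    apply in_obj G hx (by omega) h2 (by omega) (by omega)
    · intro _ o' ho'
      exact hall o' (carry_mem_structs_scm ho')
    · intro _ o' ho'
      exact hall o' (carry_mem_structs_icm ho')
    · intro _ o' ho'
      exact hall o' (carry_mem_structs_saved ho')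
    · intro _ o' ho'
      exact hall o' (carry_mem_structs_pend ho')

/-- **A window inside the capacity of the SavedImages array's object**: it misses every other component. -/
theorem in_saved_arr (G : carry_Geo H F R) {s : Saved} {x : HObj} (hs : F.saved = some s) (hx : x ∈ H.objs) (hb : x.base = s.arr)
    (h1 : s.arr ≤ w.lo) (h2 : w.hi ≤ s.arr + x.cap) (hk : kSav → False) : carry_Off F R kScm kIcm kSav kPend kCur w := by
  have hin : (s.arr, 56 * s.imgs.length) ∈ Saved.structs F.saved := by
    rw [hs]
    simp only [Saved.structs, List.mem_cons, true_or]
  have hne := G.struct_ne _ (carry_mem_structs_saved hin)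
  obtain ⟨x1, x2, x3, x4, x5⟩ := G.cross
  simp only at hne
  apply in_obj G hx (by omega) (by omega) (by omega) (by omega)
  · intro _ o ho
    have := x1 o ho _ hin
    simp only at this
    exact Or.inl (by omega)
  · intro _ o ho
    have := x2 o ho _ hin
    simp only at this
    exact Or.inl (by omega)
  · intro k
    exact absurd k hk
  · intro _ o ho
    have := x5 _ hin o ho
    simp only at this
    exact Or.inl (by omega)

/-- **A window inside the capacity of the pending extension array's object**: it misses every other component. -/
theorem in_pend_arr (G : carry_Geo H F R) {e : Exts} {x : HObj} (hs : F.pend = some e) (hx : x ∈ H.objs) (hb : x.base = e.arr)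
    (h1 : e.arr ≤ w.lo) (h2 : w.hi ≤ e.arr + x.cap) (hk : kPend → False) : carry_Off F R kScm kIcm kSav kPend kCur w := by
  have hin : (e.arr, 24 * e.blocks.length) ∈ Exts.structs F.pend := by
    rw [hs]
    simp only [Exts.structs, List.mem_singleton]
  have hne := G.struct_ne _ (carry_mem_structs_pend hin)
  obtain ⟨x1, x2, x3, x4, x5⟩ := G.cross
  simp only at hne
  apply in_obj G hx (by omega) (by omega) (by omega) (by omega)
  · intro _ o ho
    have := x3 o ho _ hin
    simp only at this
    exact Or.inl (by omega)
  · intro _ o ho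
    have := x4 o ho _ hin
    simp only at this
    exact Or.inl (by omega)
  · intro _ o ho
    have := x5 o ho _ hin
    simp only at this
    exact Or.inl (by omega)
  · intro k
    exact absurd k hk

end carry_Off

/-! #### 3c. The shape through a footprint that misses the kept components -/

/-- **THE GENERAL STEP**: every window of the footprint misses the components whose flag is on (`carry_Off`); a component whose flag
is on is kept, the shape of any other component in the new memory is a hypothesis. -/
theorem Shape.carry_set {H : Heap} {F : Forest} {R : Rd} {mem mem' : Mem} {ws : List Span} (h : Shape F R mem)
    (G : carry_Geo H F R) (hs : Mem.SameExcept ws mem mem') {kScm kIcm kSav kPend kCur : Prop}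
    (hoff : ∀ w, w ∈ ws → carry_Off F R kScm kIcm kSav kPend kCur w)
    (scm' icm' : Option Map) (saved' : Option Saved) (pend' : Option Exts)
    (hscm : (kScm ∧ scm' = F.scm) ∨ MapAt scm' (GifFileType.SColorMap mem' F.gif) mem')
    (hicm : (kIcm ∧ icm' = F.icm) ∨ MapAt icm' (GifFileType.Image.ColorMap mem' F.gif) mem')
    (hsaved : (kSav ∧ saved' = F.saved) ∨
      SavedAt saved' (GifFileType.SavedImages mem' F.gif) (GifFileType.ImageCount mem' F.gif) mem')
    (hpend : (kPend ∧ pend' = F.pend) ∨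
      ExtsAt pend' (GifFileType.ExtensionBlocks mem' F.gif) (GifFileType.ExtensionBlockCount mem' F.gif) mem')
    (hcursor : kCur ∨ CursorOK R mem') : Shape ⟨F.gif, F.pv, scm', icm', saved', pend'⟩ R mem' := by
  obtain ⟨xg, hxg, eg, cg⟩ := G.gifObj
  obtain ⟨xp, hxp, ep, cp⟩ := G.pvObj
  have bg := G.inData xg hxg
  have bp := G.inData xp hxp
  have bc := G.cur
  have hlt : ∀ o, o ∈ F.structs → o.1 + o.2 < 2 ^ 64 := by
    intro o ho
    obtain ⟨y, hy, e, hcap⟩ := G.structObj o ho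
    have := G.inData y hy
    omega
  have hE : ∀ lo hi, (∀ w, w ∈ ws → hi ≤ w.lo ∨ w.hi ≤ lo) → Mem.EqOn lo hi mem mem' := by
    intro lo hi hd
    exact hs.eqOn lo hi hd
  have hgif3 : Mem.EqOn (F.gif + 104) (F.gif + 120) mem mem' := by
    apply hE
    intro w hw
    have := (hoff w hw).gif3
    omega
  have hpv1 : Mem.EqOn F.pv (F.pv + 4) mem mem' := by
    apply hE
    intro w hw
    have := (hoff w hw).pv1
    omega
  have hpv2 : Mem.EqOn (F.pv + 64) (F.pv + 80) mem mem' := by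
    apply hE
    intro w hw
    have := (hoff w hw).pv2
    omega
  have hconsts : Mem.EqOn 0x141300 0x14139a mem mem' := by
    apply hE
    intro w hw
    have := (hoff w hw).consts
    omega
  refine ⟨?_, ?_, ?_, ?_, ?_, ?_, ?_, ?_, ?_, ?_, ?_⟩
  · show GifFileType.Private mem' F.gif = F.pv
    have := h.priv
    simp only [gfield] at this ⊢
    rw [hgif3.rd (F.gif + 112) 8 (by omega) (by omega) (by omega)]
    exact this
  · show GifFileType.UserData mem' F.gif = R.cur
    have := h.user
    simp only [gfield] at this ⊢
    rw [hgif3.rd (F.gif + 104) 8 (by omega) (by omega) (by omega)]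
    exact this
  · show MapAt scm' (GifFileType.SColorMap mem' F.gif) mem'
    rcases hscm with ⟨k, e⟩ | hm
    · subst e
      have he : Mem.EqOn (F.gif + 24) (F.gif + 32) mem mem' := by
        apply hE
        intro w hw
        have := (hoff w hw).scmF k
        omega
      have f1 : GifFileType.SColorMap mem' F.gif = GifFileType.SColorMap mem F.gif := by
        simp only [gfield]
        exact he.rd (F.gif + 24) 8 (by omega) (by omega) (by omega)
      rw [f1]
      apply h.scm.frame
      · intro o ho
        apply hE
        intro w hw
        have := (hoff w hw).scmS k o ho
        omega
      · intro x hx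
        exact hlt (x.obj, 24) (carry_mem_structs_scm (by
          rw [hx]
          simp only [Map.structs, List.mem_singleton]))
    · exact hm
  · show MapAt icm' (GifFileType.Image.ColorMap mem' F.gif) mem'
    rcases hicm with ⟨k, e⟩ | hm
    · subst e
      have he : Mem.EqOn (F.gif + 64) (F.gif + 72) mem mem' := by
        apply hE
        intro w hw
        have := (hoff w hw).icmF k
        omega
      have f1 : GifFileType.Image.ColorMap mem' F.gif = GifFileType.Image.ColorMap mem F.gif := by
        simp only [gfield]
        exact he.rd (F.gif + 64) 8 (by omega) (by omega) (by omega)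
      rw [f1]
      apply h.icm.frame
      · intro o ho
        apply hE
        intro w hw
        have := (hoff w hw).icmS k o ho
        omega
      · intro x hx
        exact hlt (x.obj, 24) (carry_mem_structs_icm (by
          rw [hx]
          simp only [Map.structs, List.mem_singleton]))
    · exact hm
  · show SavedAt saved' (GifFileType.SavedImages mem' F.gif) (GifFileType.ImageCount mem' F.gif) mem'
    rcases hsaved with ⟨k, e⟩ | hm
    · subst e
      have he1 : Mem.EqOn (F.gif + 72) (F.gif + 80) mem mem' := by
        apply hE
        intro w hw
        have := (hoff w hw).savF k
        omega
      have he2 : Mem.EqOn (F.gif + 32) (F.gif + 36) mem mem' := by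
        apply hE
        intro w hw
        have := (hoff w hw).cntF k
        omega
      have f1 : GifFileType.SavedImages mem' F.gif = GifFileType.SavedImages mem F.gif := by
        simp only [gfield]
        exact he1.rd (F.gif + 72) 8 (by omega) (by omega) (by omega)
      have f2 : GifFileType.ImageCount mem' F.gif = GifFileType.ImageCount mem F.gif := by
        simp only [gfield]
        exact he2.rd (F.gif + 32) 4 (by omega) (by omega) (by omega)
      rw [f1, f2]
      apply h.saved.frame
      · intro o ho
        apply hE
        intro w hw
        have := (hoff w hw).savS k o ho
        omega
      · intro o ho
        exact hlt o (carry_mem_structs_saved ho)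
    · exact hm
  · show ExtsAt pend' (GifFileType.ExtensionBlocks mem' F.gif) (GifFileType.ExtensionBlockCount mem' F.gif) mem'
    rcases hpend with ⟨k, e⟩ | hm
    · subst e
      have he1 : Mem.EqOn (F.gif + 88) (F.gif + 96) mem mem' := by
        apply hE
        intro w hw
        have := (hoff w hw).pendF k
        omega
      have he2 : Mem.EqOn (F.gif + 80) (F.gif + 84) mem mem' := by
        apply hE
        intro w hw
        have := (hoff w hw).pcF k
        omega
      have f1 : GifFileType.ExtensionBlocks mem' F.gif = GifFileType.ExtensionBlocks mem F.gif := by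
        simp only [gfield]
        exact he1.rd (F.gif + 88) 8 (by omega) (by omega) (by omega)
      have f2 : GifFileType.ExtensionBlockCount mem' F.gif = GifFileType.ExtensionBlockCount mem F.gif := by
        simp only [gfield]
        exact he2.rd (F.gif + 80) 4 (by omega) (by omega) (by omega)
      rw [f1, f2]
      apply h.pend.frame
      · intro o ho
        apply hE
        intro w hw
        have := (hoff w hw).pendS k o ho
        omega
      · intro x hx
        exact hlt (x.arr, 24 * x.blocks.length) (carry_mem_structs_pend (by
          rw [hx]
          simp only [Exts.structs, List.mem_singleton]))
    · exact hm
  · show GifFilePrivateType.Read mem' F.pv = memReadEntry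
    have := h.read
    simp only [gfield] at this ⊢
    rw [hpv2.rd (F.pv + 72) 8 (by omega) (by omega) (by omega)]
    exact this
  · show GifFilePrivateType.File mem' F.pv = 0
    have := h.file
    simp only [gfield] at this ⊢
    rw [hpv2.rd (F.pv + 64) 8 (by omega) (by omega) (by omega)]
    exact this
  · show GifFilePrivateType.FileState mem' F.pv = 8
    have := h.state
    simp only [gfield] at this ⊢
    rw [hpv1.rd F.pv 4 (by omega) (by omega) (by omega)]
    exact this
  · rcases hcursor with k | hc
    · have he : Mem.EqOn R.cur (R.cur + 16) mem mem' := by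
        apply hE
        intro w hw
        have := (hoff w hw).cursor k
        omega
      have c1 : mem_cursor.cur mem' R.cur = mem_cursor.cur mem R.cur := by
        simp only [gfield]
        exact he.rd R.cur 8 (by omega) (by omega) (by omega)
      have c2 : mem_cursor.end mem' R.cur = mem_cursor.end mem R.cur := by
        simp only [gfield]
        exact he.rd (R.cur + 8) 8 (by omega) (by omega) (by omega)
      obtain ⟨k1, k2, k3⟩ := h.cursor
      refine ⟨?_, ?_, ?_⟩
      · rw [c1]
        exact k1
      · rw [c1, c2]
        exact k2
      · rw [c2]
        exact k3
    · exact hc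
  · obtain ⟨k1, k2, k3⟩ := h.consts
    refine ⟨?_, ?_, ?_⟩
    · intro k hk12
      rw [hconsts.rd (0x141380 + 2 * k) 2 (by omega) (by omega) (by omega)]
      exact k1 k hk12
    · rw [hconsts.rd 0x141340 4 (by omega) (by omega) (by omega)]
      rw [hconsts.rd 0x141344 4 (by omega) (by omega) (by omega)]
      rw [hconsts.rd 0x141348 4 (by omega) (by omega) (by omega)]
      rw [hconsts.rd 0x14134c 4 (by omega) (by omega) (by omega)]
      exact k2
    · rw [hconsts.rd 0x141300 4 (by omega) (by omega) (by omega)]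
      rw [hconsts.rd 0x141304 4 (by omega) (by omega) (by omega)]
      rw [hconsts.rd 0x141308 4 (by omega) (by omega) (by omega)]
      rw [hconsts.rd 0x14130c 4 (by omega) (by omega) (by omega)]
      exact k3

/-! #### 3d. The steps -/

/-- **`gif.SColorMap` was stored to** (`[gif + 24, gif + 32)`): DGifGetScreenDesc l.280, 292, 301; DGifCloseFile l.697. -/
theorem Shape.set_scm {H : Heap} {F : Forest} {R : Rd} {mem mem' : Mem} {ws : List Span} (h : Shape F R mem)
    (hp : Placed H F.owned) (hok : HeapOK H mem) (hcur : 0x700000 ≤ R.cur ∧ R.cur + 16 ≤ 0x800000)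
    (hs : Mem.SameExcept ws mem mem')
    (hl : ∀ w, w ∈ ws → Loose H F R w ∨ (F.gif + 24 ≤ w.lo ∧ w.hi ≤ F.gif + 32))
    (m' : Option Map) (hm : MapAt m' (GifFileType.SColorMap mem' F.gif) mem') : Shape { F with scm := m' } R mem' := by
  have G := carry_Geo.intro h hp hok hcur
  have hoff : ∀ w, w ∈ ws → carry_Off F R False True True True True w := by
    intro w hw
    rcases hl w hw with hloose | ⟨h1, h2⟩
    · exact carry_Off.of_loose G hloose
    · exact carry_Off.in_gif G 24 32 h1 h2 (by omega) (fun k => absurd k id) (fun _ => by omega) (fun _ => by omega)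
        (fun _ => by omega)
  exact h.carry_set G hs hoff m' F.icm F.saved F.pend (Or.inr hm) (Or.inl ⟨trivial, rfl⟩) (Or.inl ⟨trivial, rfl⟩)
    (Or.inl ⟨trivial, rfl⟩) (Or.inl trivial)

/-- **`gif.Image.ColorMap` was stored to** (`[gif + 64, gif + 72)`): DGifGetImageHeader l.381, 390, 396, 409; DGifCloseFile l.692. -/
theorem Shape.set_icm {H : Heap} {F : Forest} {R : Rd} {mem mem' : Mem} {ws : List Span} (h : Shape F R mem)
    (hp : Placed H F.owned) (hok : HeapOK H mem) (hcur : 0x700000 ≤ R.cur ∧ R.cur + 16 ≤ 0x800000)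
    (hs : Mem.SameExcept ws mem mem')
    (hl : ∀ w, w ∈ ws → Loose H F R w ∨ (F.gif + 64 ≤ w.lo ∧ w.hi ≤ F.gif + 72))
    (m' : Option Map) (hm : MapAt m' (GifFileType.Image.ColorMap mem' F.gif) mem') : Shape { F with icm := m' } R mem' := by
  have G := carry_Geo.intro h hp hok hcur
  have hoff : ∀ w, w ∈ ws → carry_Off F R True False True True True w := by
    intro w hw
    rcases hl w hw with hloose | ⟨h1, h2⟩
    · exact carry_Off.of_loose G hloose
    · exact carry_Off.in_gif G 64 72 h1 h2 (by omega) (fun _ => by omega) (fun k => absurd k id) (fun _ => by omega)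
        (fun _ => by omega)
  exact h.carry_set G hs hoff F.scm m' F.saved F.pend (Or.inl ⟨trivial, rfl⟩) (Or.inr hm) (Or.inl ⟨trivial, rfl⟩)
    (Or.inl ⟨trivial, rfl⟩) (Or.inl trivial)

/-- **`gif.SavedImages` / `gif.ImageCount` were stored to** (`[gif + 72, gif + 80)`, `[gif + 32, gif + 36)`), **or a slot of the
array** (any window inside the capacity of the OLD array object, or of a NEW one that the old forest does not own: `hnew`):
DGifGetImageDesc l.452, 455, 461-476; DGifDecreaseImageCounter; DGifSlurp l.1222, 1267-1268; DGifCloseFile l.702. -/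
theorem Shape.set_saved {H : Heap} {F : Forest} {R : Rd} {mem mem' : Mem} {ws : List Span} (h : Shape F R mem)
    (hp : Placed H F.owned) (hok : HeapOK H mem) (hcur : 0x700000 ≤ R.cur ∧ R.cur + 16 ≤ 0x800000)
    (hs : Mem.SameExcept ws mem mem')
    (hl : ∀ w, w ∈ ws → Loose H F R w ∨ (F.gif + 72 ≤ w.lo ∧ w.hi ≤ F.gif + 80) ∨ (F.gif + 32 ≤ w.lo ∧ w.hi ≤ F.gif + 36) ∨
      (∃ s x, F.saved = some s ∧ x ∈ H.objs ∧ x.base = s.arr ∧ s.arr ≤ w.lo ∧ w.hi ≤ s.arr + x.cap))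
    (s' : Option Saved)
    (hsv : SavedAt s' (GifFileType.SavedImages mem' F.gif) (GifFileType.ImageCount mem' F.gif) mem') :
    Shape { F with saved := s' } R mem' := by
  have G := carry_Geo.intro h hp hok hcur
  have hoff : ∀ w, w ∈ ws → carry_Off F R True True False True True w := by
    intro w hw
    rcases hl w hw with hloose | ⟨h1, h2⟩ | ⟨h1, h2⟩ | ⟨s, x, hsv', hx, hb, h1, h2⟩
    · exact carry_Off.of_loose G hloose
    · exact carry_Off.in_gif G 72 80 h1 h2 (by omega) (fun _ => by omega) (fun _ => by omega) (fun k => absurd k id)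
        (fun _ => by omega)
    · exact carry_Off.in_gif G 32 36 h1 h2 (by omega) (fun _ => by omega) (fun _ => by omega) (fun k => absurd k id)
        (fun _ => by omega)
    · exact carry_Off.in_saved_arr G hsv' hx hb h1 h2 id
  exact h.carry_set G hs hoff F.scm F.icm s' F.pend (Or.inl ⟨trivial, rfl⟩) (Or.inl ⟨trivial, rfl⟩) (Or.inr hsv)
    (Or.inl ⟨trivial, rfl⟩) (Or.inl trivial)

/-- **`gif.ExtensionBlocks` / `gif.ExtensionBlockCount` were stored to** (`[gif + 88, gif + 96)`, `[gif + 80, gif + 84)`), **or a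
block of the pending array**: DGifSlurp l.1193-1194, 1271-1272; GifAddExtensionBlock; GifFreeExtensions. -/
theorem Shape.set_pend {H : Heap} {F : Forest} {R : Rd} {mem mem' : Mem} {ws : List Span} (h : Shape F R mem)
    (hp : Placed H F.owned) (hok : HeapOK H mem) (hcur : 0x700000 ≤ R.cur ∧ R.cur + 16 ≤ 0x800000)
    (hs : Mem.SameExcept ws mem mem')
    (hl : ∀ w, w ∈ ws → Loose H F R w ∨ (F.gif + 88 ≤ w.lo ∧ w.hi ≤ F.gif + 96) ∨ (F.gif + 80 ≤ w.lo ∧ w.hi ≤ F.gif + 84) ∨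
      (∃ e x, F.pend = some e ∧ x ∈ H.objs ∧ x.base = e.arr ∧ e.arr ≤ w.lo ∧ w.hi ≤ e.arr + x.cap))
    (e' : Option Exts)
    (he : ExtsAt e' (GifFileType.ExtensionBlocks mem' F.gif) (GifFileType.ExtensionBlockCount mem' F.gif) mem') :
    Shape { F with pend := e' } R mem' := by
  have G := carry_Geo.intro h hp hok hcur
  have hoff : ∀ w, w ∈ ws → carry_Off F R True True True False True w := by
    intro w hw
    rcases hl w hw with hloose | ⟨h1, h2⟩ | ⟨h1, h2⟩ | ⟨e, x, hpe, hx, hb, h1, h2⟩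
    · exact carry_Off.of_loose G hloose
    · exact carry_Off.in_gif G 88 96 h1 h2 (by omega) (fun _ => by omega) (fun _ => by omega) (fun _ => by omega)
        (fun k => absurd k id)
    · exact carry_Off.in_gif G 80 84 h1 h2 (by omega) (fun _ => by omega) (fun _ => by omega) (fun _ => by omega)
        (fun k => absurd k id)
    · exact carry_Off.in_pend_arr G hpe hx hb h1 h2 id
  exact h.carry_set G hs hoff F.scm F.icm F.saved e' (Or.inl ⟨trivial, rfl⟩) (Or.inl ⟨trivial, rfl⟩) (Or.inl ⟨trivial, rfl⟩)
    (Or.inr he) (Or.inl trivial)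

/-- **Both at once** (DGifSlurp l.1266-1272: the pending list moves to the last image). -/
theorem Shape.set_saved_pend {H : Heap} {F : Forest} {R : Rd} {mem mem' : Mem} {ws : List Span} (h : Shape F R mem)
    (hp : Placed H F.owned) (hok : HeapOK H mem) (hcur : 0x700000 ≤ R.cur ∧ R.cur + 16 ≤ 0x800000)
    (hs : Mem.SameExcept ws mem mem')
    (hl : ∀ w, w ∈ ws → Loose H F R w ∨ (F.gif + 72 ≤ w.lo ∧ w.hi ≤ F.gif + 96) ∨ (F.gif + 32 ≤ w.lo ∧ w.hi ≤ F.gif + 36) ∨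
      (∃ s x, F.saved = some s ∧ x ∈ H.objs ∧ x.base = s.arr ∧ s.arr ≤ w.lo ∧ w.hi ≤ s.arr + x.cap))
    (s' : Option Saved) (e' : Option Exts)
    (hsv : SavedAt s' (GifFileType.SavedImages mem' F.gif) (GifFileType.ImageCount mem' F.gif) mem')
    (he : ExtsAt e' (GifFileType.ExtensionBlocks mem' F.gif) (GifFileType.ExtensionBlockCount mem' F.gif) mem') :
    Shape { F with saved := s', pend := e' } R mem' := by
  have G := carry_Geo.intro h hp hok hcur
  have hoff : ∀ w, w ∈ ws → carry_Off F R True True False False True w := by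
    intro w hw
    rcases hl w hw with hloose | ⟨h1, h2⟩ | ⟨h1, h2⟩ | ⟨s, x, hsv', hx, hb, h1, h2⟩
    · exact carry_Off.of_loose G hloose
    · exact carry_Off.in_gif G 72 96 h1 h2 (by omega) (fun _ => by omega) (fun _ => by omega) (fun k => absurd k id)
        (fun k => absurd k id)
    · exact carry_Off.in_gif G 32 36 h1 h2 (by omega) (fun _ => by omega) (fun _ => by omega) (fun k => absurd k id)
        (fun k => absurd k id)
    · exact carry_Off.in_saved_arr G hsv' hx hb h1 h2 id
  exact h.carry_set G hs hoff F.scm F.icm s' e' (Or.inl ⟨trivial, rfl⟩) (Or.inl ⟨trivial, rfl⟩) (Or.inr hsv) (Or.inr he)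
    (Or.inl trivial)

/-- **The cursor advanced** (`mem_read`: `c->cur += count`, `[R.cur, R.cur + 8)`). -/
theorem Shape.set_cursor {H : Heap} {F : Forest} {R : Rd} {mem mem' : Mem} {ws : List Span} (h : Shape F R mem)
    (hp : Placed H F.owned) (hok : HeapOK H mem) (hcur : 0x700000 ≤ R.cur ∧ R.cur + 16 ≤ 0x800000)
    (hs : Mem.SameExcept ws mem mem')
    (hl : ∀ w, w ∈ ws → Loose H F R w ∨ (R.cur ≤ w.lo ∧ w.hi ≤ R.cur + 8))
    (hc : CursorOK R mem') : Shape F R mem' := by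
  have G := carry_Geo.intro h hp hok hcur
  have hoff : ∀ w, w ∈ ws → carry_Off F R True True True True False w := by
    intro w hw
    rcases hl w hw with hloose | ⟨h1, h2⟩
    · exact carry_Off.of_loose G hloose
    · exact carry_Off.in_cursor G h1 (by omega) id
  exact h.carry_set G hs hoff F.scm F.icm F.saved F.pend (Or.inl ⟨trivial, rfl⟩) (Or.inl ⟨trivial, rfl⟩) (Or.inl ⟨trivial, rfl⟩)
    (Or.inl ⟨trivial, rfl⟩) (Or.inr hc)

/-- **A loose window misses every structural window of the forest.** For a step whose footprint has, beside the windows of the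
component it changes, ONE loose window (the return addresses that the checks of the segment pushed on the own stack): the
structural windows of the kept components read the same (`Mem.SameExcept.eqOn`). -/
theorem Loose.off_structs {H : Heap} {F : Forest} {R : Rd} {w : Span} (G : carry_Geo H F R) (hw : Loose H F R w) :
    ∀ o, o ∈ F.structs → w.hi ≤ o.1 ∨ o.1 + o.2 ≤ w.lo := by
  have hoff : carry_Off F R True True True True True w := carry_Off.of_loose G hw
  intro o ho
  unfold Forest.structs at ho
  rcases List.mem_append.mp ho with h123 | h4
  · rcases List.mem_append.mp h123 with h12 | h3
    · rcases List.mem_append.mp h12 with h1 | h2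
      · exact hoff.scmS trivial o h1
      · exact hoff.icmS trivial o h2
    · exact hoff.savS trivial o h3
  · exact hoff.pendS trivial o h4

/-! ### 4. Through a call of the heap -/

/-- **Through an allocation that succeeded** (`malloc(n)`, `calloc`, a `realloc` / `reallocarray` of NULL): `ws` is the callee's
footprint — its stack frame, the control cell, the new header, the new object and its shadow: all loose for the OLD heap —, the
heap has one more object. The forest is untouched. -/
theorem GifOK.through_alloc {H : Heap} {F : Forest} {R : Rd} {mem mem' : Mem} {ws : List Span} (h : GifOK H F R mem)
    (hok : HeapOK H mem) (hcur : 0x700000 ≤ R.cur ∧ R.cur + 16 ≤ 0x800000) (hs : Mem.SameExcept ws mem mem')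
    (hl : ∀ w, w ∈ ws → Loose H F R w) (n c : Nat) : GifOK (H.push n c) F R mem' :=
  ⟨h.owns.push n c, (h.sameExcept hok hcur hs hl).shape⟩

/-- **Through `free(p)`** of an object of the heap: `ws` is the callee's footprint — its stack frame, the state word of `p`'s
header, the shadow of `p` —; the shape is untouched (so a field that pointed to `p` DANGLES: the caller stores NULL next, with a
`Shape.set_…` step), and where the objects are does not change. -/
theorem Shape.through_free {H : Heap} {F : Forest} {R : Rd} {mem mem' : Mem} {ws : List Span} (h : Shape F R mem)
    (hp : Placed H F.owned) (hok : HeapOK H mem) (hcur : 0x700000 ≤ R.cur ∧ R.cur + 16 ≤ 0x800000)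
    (hs : Mem.SameExcept ws mem mem') (hl : ∀ w, w ∈ ws → Loose H F R w) (p : Nat) :
    Shape F R mem' ∧ Placed (H.release p) F.owned :=
  ⟨h.sameExcept hp hok hcur hs hl, hp.release p⟩

end Gif.Spec
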